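-- pv_equiv track=rewrite | github.com/Alex-Kuimov/generhythm | test.py | replace_notes_with_ids
-- ===== SOURCE A (Python) =====
-- def replace_notes_with_ids(notes, note_dict):
--     id_notes = []
--     for note in notes:
--         for key, value in note_dict.items():
--             if note in value:
--                 id_notes.append(key)
--                 break
--     return id_notes
-- ===== SOURCE B (Python) =====
-- def replace_notes_with_ids(notes, note_dict):
--     lookup = {}
--     for key, value in note_dict.items():
--         for v in value:
--             if v not in lookup:
--                 lookup[v] = key
--     return [lookup[note] for note in notes if note in lookup]
-- ===== Notes on version B (the rewrite author's own statement) =====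
-- stated objective: faster
-- what changed: B precomputes a reverse value->first-key lookup dict once, then resolves each note with one O(1) lookup instead of rescanning the whole dict per note.
import Mathlib
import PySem

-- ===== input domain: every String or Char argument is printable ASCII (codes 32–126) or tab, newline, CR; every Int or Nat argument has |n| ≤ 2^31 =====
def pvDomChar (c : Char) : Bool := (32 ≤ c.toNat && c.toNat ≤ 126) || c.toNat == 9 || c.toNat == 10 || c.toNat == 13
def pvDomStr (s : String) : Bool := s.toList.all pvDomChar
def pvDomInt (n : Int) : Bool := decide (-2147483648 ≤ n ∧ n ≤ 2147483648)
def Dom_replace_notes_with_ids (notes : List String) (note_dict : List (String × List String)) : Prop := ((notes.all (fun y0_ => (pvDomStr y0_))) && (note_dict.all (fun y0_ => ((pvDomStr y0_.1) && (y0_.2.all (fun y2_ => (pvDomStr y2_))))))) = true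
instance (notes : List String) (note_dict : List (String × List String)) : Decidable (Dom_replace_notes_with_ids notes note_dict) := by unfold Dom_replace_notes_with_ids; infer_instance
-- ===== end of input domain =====

-- B builds a reverse value->first-key lookup dict once and resolves each note in O(1), instead of rescanning the whole dict per note.


-- ===== PORT A =====
-- inner 'for key, value in note_dict.items(): if note in value: append(key); break'
def pvInnerA (note : String) : List (String × List String) → List String → List String
  | [], acc => acc
  | (key, value) :: rest, acc =>
      if note ∈ value then acc ++ [key] else pvInnerA note rest acc

def replace_notes_with_ids (notes : List String) (note_dict : List (String × List String)) : List String :=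
  notes.foldl (fun id_notes note => pvInnerA note note_dict id_notes) []

-- ===== PORT B =====
-- 'lookup = {}; for key, value in …: for v in value: if v not in lookup: lookup[v] = key'
def pvLookup (note_dict : List (String × List String)) : PySem.Dict String String :=
  note_dict.foldl
    (fun d kv => kv.2.foldl (fun d v => if d.contains v then d else d.insert v kv.1) d)
    PySem.Dict.empty

def replace_notes_with_ids_alt (notes : List String) (note_dict : List (String × List String)) : List String :=
  notes.filterMap (fun note => (pvLookup note_dict).get? note)

-- ===== PRECONDITION & SPEC =====
def Spec_replace_notes_with_ids (notes : List String) (note_dict : List (String × List String)) (out : List String) : Prop := out = replace_notes_with_ids_alt notes note_dict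
instance (notes : List String) (note_dict : List (String × List String)) (out : List String) : Decidable (Spec_replace_notes_with_ids notes note_dict out) := by unfold Spec_replace_notes_with_ids; infer_instance

-- ===== CLAIM (what is proved, stated in full; the proofs are below) =====
def Claim_equal_replace_notes_with_ids : Prop := ∀ (notes : List String) (note_dict : List (String × List String)), Dom_replace_notes_with_ids notes note_dict → Spec_replace_notes_with_ids notes note_dict (replace_notes_with_ids notes note_dict)

-- ===== LEMMAS AND PROOFS =====

-- the key A's inner loop appends: first pair whose value list contains the note
def pvFirstKey (note_dict : List (String × List String)) (note : String) : Option String :=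
  note_dict.findSome? (fun kv => if note ∈ kv.2 then some kv.1 else none)

theorem pvInnerA_eq (note : String) (nd : List (String × List String)) (acc : List String) :
    pvInnerA note nd acc = acc ++ (pvFirstKey nd note).toList := by
  induction nd generalizing acc with
  | nil => simp [pvInnerA, pvFirstKey]
  | cons kv rest ih =>
      obtain ⟨k, v⟩ := kv
      by_cases h : note ∈ v <;> simp [pvInnerA, pvFirstKey, h, ih]

theorem pvLookup_inner (k note : String) (v : List String) (d : PySem.Dict String String) :
    ((v.foldl (fun d x => if d.contains x then d else d.insert x k) d).get? note)
      = ((d.get? note).orElse (fun _ => if note ∈ v then some k else none)) := by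
  induction v generalizing d with
  | nil => cases hg : d.get? note <;> simp [hg, Option.orElse]
  | cons x v' ih =>
      simp only [List.foldl_cons]
      by_cases hc : d.contains x = true
      · rw [if_pos hc, ih]
        by_cases hx : note = x
        · subst hx
          rw [PySem.Dict.contains_eq_isSome_get?] at hc
          cases hg : d.get? note with
          | none => rw [hg] at hc; simp at hc
          | some w => simp [Option.orElse]
        · cases d.get? note <;> simp [Option.orElse, hx]
      · rw [if_neg hc, ih]
        by_cases hx : note = x
        · subst hx
          rw [PySem.Dict.contains_eq_isSome_get?] at hc
          cases hg : d.get? note with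
          | none => simp [PySem.Dict.get?_insert_self, Option.orElse]
          | some w => rw [hg] at hc; simp at hc
        · rw [PySem.Dict.get?_insert_of_ne _ _ hx]
          cases d.get? note <;> simp [Option.orElse, hx]

theorem pvLookup_get? (nd : List (String × List String)) (note : String) (d : PySem.Dict String String) :
    ((nd.foldl (fun d kv => kv.2.foldl (fun d v => if d.contains v then d else d.insert v kv.1) d) d).get? note)
      = ((d.get? note).orElse (fun _ => pvFirstKey nd note)) := by
  induction nd generalizing d with
  | nil => cases hg : d.get? note <;> simp [hg, pvFirstKey, Option.orElse]
  | cons kv rest ih =>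
      obtain ⟨k, v⟩ := kv
      simp only [List.foldl_cons]
      rw [ih, pvLookup_inner]
      by_cases h : note ∈ v <;>
        cases d.get? note <;> simp [pvFirstKey, h, Option.orElse]

theorem pvFoldlA_eq (nd : List (String × List String)) (notes : List String) (acc : List String) :
    notes.foldl (fun id_notes note => pvInnerA note nd id_notes) acc
      = acc ++ notes.filterMap (pvFirstKey nd) := by
  induction notes generalizing acc with
  | nil => simp
  | cons n ns ih =>
      simp only [List.foldl_cons, List.filterMap_cons]
      rw [ih, pvInnerA_eq]
      cases pvFirstKey nd n <;> simp

-- ===== VERDICT (by name: the statement is the Claim_ definition above) =====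
theorem replace_notes_with_ids_spec : Claim_equal_replace_notes_with_ids := by
  intro notes nd _
  unfold Spec_replace_notes_with_ids replace_notes_with_ids replace_notes_with_ids_alt
  rw [pvFoldlA_eq]
  simp only [List.nil_append]
  apply List.filterMap_congr
  intro n _
  rw [pvLookup, pvLookup_get?, PySem.Dict.get?_empty]
  rfl
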